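-- pv_equiv track=rewrite | github.com/thelollipopman/SML-Project-YOLO-Code-Demo | yolo.py | detect_six_seven
-- ===== SOURCE A (Python) =====
-- def detect_six_seven(history):
--     compact = []
--     valid_states = ["L_up_R_down", "L_down_R_up"]
--
--     for state in history:
--         if state in valid_states:
--             if len(compact) == 0 or compact[-1] != state:
--                 compact.append(state)
--
--     if len(compact) < 3:
--         return False
--
--     last3 = compact[-3:]
--
--     return (
--         last3 == ["L_up_R_down", "L_down_R_up", "L_up_R_down"] or
--         last3 == ["L_down_R_up", "L_up_R_down", "L_down_R_up"]
--     )
-- ===== SOURCE B (Python) =====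
-- def detect_six_seven(history):
--     tail = []  # last (up to 3) states of the compacted valid-state sequence, forward order
--     for state in reversed(history):
--         if state in ("L_up_R_down", "L_down_R_up"):
--             if not tail or tail[0] != state:
--                 tail.insert(0, state)
--                 if len(tail) == 3:
--                     break
--     return (
--         tail == ["L_up_R_down", "L_down_R_up", "L_up_R_down"] or
--         tail == ["L_down_R_up", "L_up_R_down", "L_down_R_up"]
--     )
-- ===== Notes on version B (the rewrite author's own statement) =====
-- stated objective: alternative
-- what changed: B scans the history backwards keeping only a <=3-element buffer of deduplicated valid states with early termination, instead of building the full compacted list and slicing its last three.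
import Mathlib
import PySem

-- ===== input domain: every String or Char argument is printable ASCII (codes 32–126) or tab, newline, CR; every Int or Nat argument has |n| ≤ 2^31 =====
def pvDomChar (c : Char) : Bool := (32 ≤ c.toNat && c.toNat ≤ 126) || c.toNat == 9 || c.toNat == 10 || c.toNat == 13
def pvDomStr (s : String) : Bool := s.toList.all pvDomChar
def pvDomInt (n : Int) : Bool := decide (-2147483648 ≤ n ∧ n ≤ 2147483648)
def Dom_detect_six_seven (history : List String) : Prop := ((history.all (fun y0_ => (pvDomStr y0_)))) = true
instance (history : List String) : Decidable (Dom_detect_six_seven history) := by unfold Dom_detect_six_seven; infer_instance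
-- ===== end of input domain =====

-- B replaces A's full compacted list + final slice by a backward scan keeping a ≤3-element
-- buffer of deduplicated valid states with early exit (alternative decomposition, same cost class).

-- ===== PORT A =====
def pvValidStates : List String := ["L_up_R_down", "L_down_R_up"]

-- one iteration of A's for-loop body
def pvStepA (compact : List String) (state : String) : List String :=
  if state ∈ pvValidStates then
    if compact.length = 0 ∨ compact.getLast? ≠ some state then compact ++ [state]
    else compact
  else compact

def detect_six_seven (history : List String) : Bool :=
  let compact := history.foldl pvStepA []
  if compact.length < 3 then false
  else
    let last3 := PySem.List.slice compact (some (-3)) none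
    decide (last3 = ["L_up_R_down", "L_down_R_up", "L_up_R_down"] ∨
            last3 = ["L_down_R_up", "L_up_R_down", "L_down_R_up"])

-- ===== PORT B =====
-- B's backward loop: prepend each new valid state to the buffer, stop at 3 kept states
def pvTailLoop : List String → List String → List String
  | [], tail => tail
  | state :: rest, tail =>
    if state = "L_up_R_down" ∨ state = "L_down_R_up" then
      if tail = [] ∨ tail.head? ≠ some state then
        let tail' := state :: tail
        if tail'.length = 3 then tail' else pvTailLoop rest tail'
      else pvTailLoop rest tail
    else pvTailLoop rest tail

def detect_six_seven_alt (history : List String) : Bool :=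
  let tail := pvTailLoop history.reverse []
  decide (tail = ["L_up_R_down", "L_down_R_up", "L_up_R_down"] ∨
          tail = ["L_down_R_up", "L_up_R_down", "L_down_R_up"])

-- ===== PRECONDITION & SPEC =====
def Spec_detect_six_seven (history : List String) (out : Bool) : Prop := out = detect_six_seven_alt history
instance (history : List String) (out : Bool) : Decidable (Spec_detect_six_seven history out) := by unfold Spec_detect_six_seven; infer_instance

-- ===== CLAIM (what is proved, stated in full; the proofs are below) =====
def Claim_equal_detect_six_seven : Prop := ∀ (history : List String), Dom_detect_six_seven history → Spec_detect_six_seven history (detect_six_seven history)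

-- ===== LEMMAS AND PROOFS =====

def pvIsValid (s : String) : Bool := decide (s ∈ pvValidStates)

-- adjacent deduplication of a list against a "previous value" seed
def pvCompactFrom : Option String → List String → List String
  | _, [] => []
  | h, s :: l => if some s = h then pvCompactFrom h l else s :: pvCompactFrom (some s) l

theorem pvCompactFrom_head_irrel (l : List String) (a : String)
    (h : l.head? ≠ some a) : pvCompactFrom (some a) l = pvCompactFrom none l := by
  cases l with
  | nil => rfl
  | cons b l =>
    simp only [List.head?] at h
    simp only [pvCompactFrom]
    rw [if_neg (fun hh => h (by simp [show b = a from by injection hh])),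
        if_neg (by simp)]

theorem pvFoldA (l : List String) (acc : List String) :
    l.foldl pvStepA acc = acc ++ pvCompactFrom acc.getLast? (l.filter pvIsValid) := by
  induction l generalizing acc with
  | nil => simp [pvCompactFrom]
  | cons s l ih =>
    by_cases hv : pvIsValid s
    · by_cases h1 : acc.getLast? = some s
      · have hne : acc ≠ [] := by intro h; simp [h] at h1
        simp only [List.foldl_cons, pvStepA, pvIsValid, decide_eq_true_eq] at hv ⊢
        rw [if_pos hv, if_neg (by simp [h1, List.length_eq_zero_iff, hne])]
        rw [ih acc, List.filter_cons, if_pos (by simp [pvIsValid, hv])]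
        simp [pvCompactFrom, h1]
      · simp only [List.foldl_cons, pvStepA, pvIsValid, decide_eq_true_eq] at hv ⊢
        rw [if_pos hv, if_pos (Or.inr h1)]
        rw [ih (acc ++ [s]), List.filter_cons, if_pos (by simp [pvIsValid, hv])]
        have h2 : pvCompactFrom acc.getLast? (s :: List.filter pvIsValid l)
            = s :: pvCompactFrom (some s) (List.filter pvIsValid l) := by
          simp only [pvCompactFrom]; rw [if_neg (fun h => h1 h.symm)]
        simp [h2]
    · simp only [List.foldl_cons, pvStepA, pvIsValid, decide_eq_true_eq] at hv ⊢
      rw [if_neg hv, ih acc, List.filter_cons, if_neg (by simp [pvIsValid, hv])]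

theorem pvLastOr (l : List String) (b : String) (o : Option String) :
    ((b :: l).getLast?).or o = (l.getLast?).or (some b) := by
  cases l with
  | nil => rfl
  | cons c l => simp [List.getLast?_cons_cons, Option.or]
                cases h : (c :: l).getLast? with
                | none => simp [List.getLast?_eq_none_iff] at h
                | some x => rfl

theorem pvCompactFrom_concat (l : List String) (o : Option String) (a : String) :
    pvCompactFrom o (l ++ [a]) =
      if (l.getLast?).or o = some a then pvCompactFrom o l else pvCompactFrom o l ++ [a] := by
  induction l generalizing o with
  | nil =>
    simp only [List.nil_append, pvCompactFrom, List.getLast?_nil, Option.none_or]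
    by_cases h : o = some a
    · simp [h]
    · rw [if_neg (fun hh => h hh.symm), if_neg h]
  | cons b l ih =>
    rw [List.cons_append]
    simp only [pvCompactFrom]
    rw [pvLastOr]
    by_cases hb : some b = o
    · rw [if_pos hb, ih o, hb]; simp
    · rw [if_neg hb, ih (some b)]
      split_ifs <;> simp

theorem pvCompactFrom_reverse (m : List String) :
    pvCompactFrom none m.reverse = (pvCompactFrom none m).reverse := by
  induction m with
  | nil => rfl
  | cons a m ih =>
    rw [List.reverse_cons, pvCompactFrom_concat, List.getLast?_reverse, Option.or_none]
    by_cases h : m.head? = some a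
    · rw [if_pos h, ih]
      cases m with
      | nil => simp at h
      | cons b m' =>
        simp only [List.head?] at h
        obtain rfl : b = a := by injection h
        simp [pvCompactFrom]
    · rw [if_neg h, ih]
      simp [pvCompactFrom, pvCompactFrom_head_irrel m a h]

theorem pvTailLoop_eq (r : List String) (tail : List String) (h3 : tail.length < 3) :
    pvTailLoop r tail =
      ((pvCompactFrom tail.head? (r.filter pvIsValid)).take (3 - tail.length)).reverse ++ tail := by
  induction r generalizing tail with
  | nil => simp [pvTailLoop, pvCompactFrom]
  | cons s r ih =>
    by_cases hv : s = "L_up_R_down" ∨ s = "L_down_R_up"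
    · have hv' : pvIsValid s = true := by
        simp [pvIsValid, pvValidStates]; rcases hv with h | h <;> simp [h]
      by_cases hd : tail.head? = some s
      · have hne : tail ≠ [] := by intro h; simp [h] at hd
        simp only [pvTailLoop]
        rw [if_pos hv, if_neg (by simp [hd, hne]), ih tail h3,
            List.filter_cons, if_pos hv']
        simp [pvCompactFrom, hd]
      · simp only [pvTailLoop]
        rw [if_pos hv, if_pos (Or.inr hd), List.filter_cons, if_pos hv']
        have hcf : pvCompactFrom tail.head? (s :: r.filter pvIsValid)
            = s :: pvCompactFrom (some s) (r.filter pvIsValid) := by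
          simp only [pvCompactFrom]; rw [if_neg (fun h => hd h.symm)]
        by_cases hlen : (s :: tail).length = 3
        · rw [if_pos hlen, hcf]
          have : tail.length = 2 := by simpa using hlen
          simp [this]
        · rw [if_neg hlen]
          have hlt : (s :: tail).length < 3 := by
            simp only [List.length_cons] at hlen ⊢; omega
          rw [ih (s :: tail) hlt, hcf]
          have h1 : 1 ≤ 3 - tail.length := by omega
          rw [List.take_cons (by omega)]
          simp only [List.reverse_cons, List.head?_cons, List.length_cons]
          have : 3 - (tail.length + 1) = 3 - tail.length - 1 := by omega
          rw [this]
          simp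
    · simp only [pvTailLoop]
      rw [if_neg hv, ih tail h3, List.filter_cons,
          if_neg (by simpa [pvIsValid, pvValidStates] using hv)]

theorem pvTail_drop (history : List String) :
    pvTailLoop history.reverse [] =
      (pvCompactFrom none (history.filter pvIsValid)).drop
        ((pvCompactFrom none (history.filter pvIsValid)).length - 3) := by
  rw [pvTailLoop_eq history.reverse [] (by simp)]
  simp only [List.head?_nil, List.append_nil]
  rw [List.filter_reverse, pvCompactFrom_reverse]
  rw [List.take_reverse, List.reverse_reverse]
  simp

-- ===== VERDICT (by name: the statement is the Claim_ definition above) =====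
theorem detect_six_seven_spec : Claim_equal_detect_six_seven := by
  intro history _
  unfold Spec_detect_six_seven detect_six_seven detect_six_seven_alt
  rw [pvTail_drop, pvFoldA]
  simp only [List.nil_append, List.getLast?_nil]
  set c := pvCompactFrom none (history.filter pvIsValid) with hc
  by_cases h3 : c.length < 3
  · rw [if_pos h3]
    have hd : c.drop (c.length - 3) = c := by
      have : c.length - 3 = 0 := by omega
      simp [this]
    rw [hd]
    have h1 : c ≠ ["L_up_R_down", "L_down_R_up", "L_up_R_down"] := by
      intro h; rw [h] at h3; simp at h3
    have h2 : c ≠ ["L_down_R_up", "L_up_R_down", "L_down_R_up"] := by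
      intro h; rw [h] at h3; simp at h3
    simp [h1, h2]
  · rw [if_neg h3]
    have hsl : PySem.List.slice (pvCompactFrom none (List.filter pvIsValid history)) (some (-3)) none
        = (pvCompactFrom none (List.filter pvIsValid history)).drop
            ((pvCompactFrom none (List.filter pvIsValid history)).length - 3) :=
      PySem.List.slice_from_neg_ofNat _ 3 (by omega)
    simp only [hsl]
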